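-- pv_equiv track=rewrite | github.com/Jemoka/adventuretime | plots.py | sort_by_key
-- ===== SOURCE A (Python) =====
-- from collections import defaultdict
--
-- def sort_by_key(data, reverse=False):
--     """small utility to sort data by key, which is a usual usecase"""
--     sorted_list = [i[1] for i in sorted(list(data.items()),
--                                         reverse=reverse,
--                                         key=lambda a:a[0])]
--     final_dict = defaultdict(list)
--
--     for i in sorted_list:
--         for k,v in i.items():
--             final_dict[k].append(v)
--
--     return dict(final_dict)
-- ===== SOURCE B (Python) =====
-- def sort_by_key(data, reverse=False):
--     """small utility to sort data by key, which is a usual usecase"""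
--     # column-major: sort rows once, collect the inner keys in first-occurrence
--     # order, then build each output list by one scan over the rows per key
--     rows = [v for _, v in sorted(data.items(), key=lambda a: a[0], reverse=reverse)]
--     keys = list(dict.fromkeys(k for d in rows for k in d))
--     return {k: [v for d in rows for kk, v in d.items() if kk == k] for k in keys}
-- ===== Notes on version B (the rewrite author's own statement) =====
-- stated objective: alternative
-- what changed: Row-major accumulation into a defaultdict is replaced by a column-major transpose: sort the rows once, dedup the inner keys in first-occurrence order, and build each output list by scanning the sorted rows per key.
import Mathlib
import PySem

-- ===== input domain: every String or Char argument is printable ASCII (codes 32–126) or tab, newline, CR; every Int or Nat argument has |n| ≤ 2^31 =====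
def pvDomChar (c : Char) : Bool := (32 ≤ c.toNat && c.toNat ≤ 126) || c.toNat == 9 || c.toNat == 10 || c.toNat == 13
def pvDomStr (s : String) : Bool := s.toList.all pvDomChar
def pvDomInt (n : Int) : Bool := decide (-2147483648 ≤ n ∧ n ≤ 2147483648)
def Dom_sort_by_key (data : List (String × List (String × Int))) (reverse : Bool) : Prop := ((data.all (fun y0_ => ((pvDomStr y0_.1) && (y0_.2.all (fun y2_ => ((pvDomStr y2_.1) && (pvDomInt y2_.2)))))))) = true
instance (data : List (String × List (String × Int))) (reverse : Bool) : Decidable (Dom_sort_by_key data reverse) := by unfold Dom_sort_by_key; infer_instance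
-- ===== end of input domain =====

-- B replaces A's row-major defaultdict accumulation with a column-major transpose
-- over the sorted rows (objective: alternative decomposition, same result).

-- ===== PORT A =====
-- row-major: sort the items, then append every inner (k, v) into a defaultdict(list)
def sort_by_key (data : List (String × List (String × Int))) (reverse : Bool) : List (String × List Int) :=
  let sorted_list := (PySem.List.sorted data (fun a => a.1) reverse).map Prod.snd
  let final_dict := sorted_list.foldl
    (fun fd i => i.foldl (fun fd kv => fd.modify kv.1 [] (fun x => x ++ [kv.2])) fd)
    (PySem.Dict.empty : PySem.Dict String (List Int))
  final_dict.items

-- ===== PORT B =====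
-- column-major: dedup the inner keys in first-occurrence order, one scan of rows per key
def sort_by_key_alt (data : List (String × List (String × Int))) (reverse : Bool) : List (String × List Int) :=
  let rows := (PySem.List.sorted data (fun a => a.1) reverse).map Prod.snd
  let keys := PySem.List.dedup (rows.flatMap (fun d => d.map Prod.fst))
  keys.map (fun k => (k, (rows.flatMap (fun d => d.filter (fun kv => kv.1 == k))).map Prod.snd))

-- ===== PRECONDITION & SPEC =====
def Spec_sort_by_key (data : List (String × List (String × Int))) (reverse : Bool) (out : List (String × List Int)) : Prop := out = sort_by_key_alt data reverse
instance (data : List (String × List (String × Int))) (reverse : Bool) (out : List (String × List Int)) : Decidable (Spec_sort_by_key data reverse out) := by unfold Spec_sort_by_key; infer_instance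

-- ===== CLAIM (what is proved, stated in full; the proofs are below) =====
def Claim_equal_sort_by_key : Prop := ∀ (data : List (String × List (String × Int))) (reverse : Bool), Dom_sort_by_key data reverse → Spec_sort_by_key data reverse (sort_by_key data reverse)

-- ===== LEMMAS AND PROOFS =====

-- flatten A's nested foldl: folding each row in turn = folding the concatenation of all rows
theorem foldl_foldl_eq_foldl_flatMap {α σ : Type} (g : σ → α → σ)
    (rows : List (List α)) (d : σ) :
    rows.foldl (fun s i => i.foldl g s) d = (rows.flatMap id).foldl g d := by
  induction rows generalizing d with
  | nil => rfl
  | cons r t ih => simp [List.flatMap_cons, List.foldl_append, ih]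

-- A's result, characterised: keys in first-occurrence order, each mapped to its column
theorem sort_by_key_eq (data : List (String × List (String × Int))) (reverse : Bool) :
    sort_by_key data reverse = sort_by_key_alt data reverse := by
  unfold sort_by_key sort_by_key_alt
  dsimp only
  set rows := (PySem.List.sorted data (fun a => a.1) reverse).map Prod.snd with hrows
  rw [foldl_foldl_eq_foldl_flatMap]
  set L := rows.flatMap id with hL
  have hnd : ((L.foldl (fun fd kv => fd.modify kv.1 [] (fun x => x ++ [kv.2]))
      (PySem.Dict.empty : PySem.Dict String (List Int)))).keys.Nodup := by
    exact PySem.Dict.nodup_keys_foldl_modify_key L Prod.fst []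
      (fun d kv v => v ++ [kv.2]) _ (by simp)
  rw [PySem.Dict.items_eq_map_keys _ hnd []]
  have hkeys : ((L.foldl (fun fd kv => fd.modify kv.1 [] (fun x => x ++ [kv.2]))
      (PySem.Dict.empty : PySem.Dict String (List Int)))).keys
      = PySem.List.dedup (rows.flatMap (fun d => d.map Prod.fst)) := by
    rw [PySem.Dict.keys_foldl_modify_key L Prod.fst [] (fun d kv v => v ++ [kv.2])]
    rw [PySem.Dict.keys_empty, PySem.Set.update_nil_left, PySem.List.dedup_eq_ofList]
    congr 1
    rw [hL, List.map_flatMap]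
    rfl
  rw [hkeys]
  apply List.map_congr_left
  intro k _
  congr 1
  rw [PySem.Dict.getD_foldl_modify_append L _ k, PySem.Dict.getD_empty]
  rw [hL, List.filter_flatMap, List.map_flatMap, List.map_flatMap]
  simp

-- ===== VERDICT (by name: the statement is the Claim_ definition above) =====
theorem sort_by_key_spec : Claim_equal_sort_by_key := by
  intro data reverse _
  unfold Spec_sort_by_key
  exact sort_by_key_eq data reverse
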